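-- pv_equiv track=rewrite | github.com/AnuragGoel09/pancard-number-extractor-api | app.py | check_pan
-- ===== SOURCE A (Python) =====
-- def check_pan(name):
--     if len(name)!=10:
--         return False
--     check=True
--     for i in range(5):
--         if name[i]>='A' and name[i]<='Z':
--             check=True
--         else:
--             return False
--     for i in range(5,9):
--         if name[i]>='0' and name[i]<='9':
--             check=True
--         else:
--             return False
--     if name[-1]>='A' and name[-1]<='Z':
--         check=True
--     else:
--         return False
--     return True
-- ===== SOURCE B (Python) =====
-- import re
--
-- _PAN_RE = re.compile(r'[A-Z]{5}[0-9]{4}[A-Z]')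
--
-- def check_pan(name):
--     return bool(_PAN_RE.fullmatch(name))
-- ===== Notes on version B (the rewrite author's own statement) =====
-- stated objective: idiomatic
-- what changed: Replaced the length guard and the three positional loops/checks with a single precompiled regular-expression fullmatch coerced to bool.
import Mathlib
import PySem

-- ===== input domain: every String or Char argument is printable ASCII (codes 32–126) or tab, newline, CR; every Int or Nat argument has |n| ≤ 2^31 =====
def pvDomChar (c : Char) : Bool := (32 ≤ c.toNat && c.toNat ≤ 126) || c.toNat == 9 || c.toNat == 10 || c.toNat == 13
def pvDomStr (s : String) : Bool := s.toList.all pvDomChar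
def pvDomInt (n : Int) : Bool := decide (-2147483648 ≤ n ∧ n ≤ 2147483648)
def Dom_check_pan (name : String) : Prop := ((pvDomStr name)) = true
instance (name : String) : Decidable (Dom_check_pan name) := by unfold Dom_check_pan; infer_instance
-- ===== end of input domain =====

-- B replaces A's length guard and three manual positional loops with a single regex fullmatch ([A-Z]{5}[0-9]{4}[A-Z]) — an idiomatic rewrite, same cost.

-- ===== PORT A =====
def check_pan (name : String) : Bool :=
  let cs := name.toList
  if cs.length ≠ 10 then false
  else if ¬ ((PySem.List.pyRange 0 5 1).all fun i =>
      match PySem.List.pyGet? cs i with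
      | some c => decide ('A' ≤ c) && decide (c ≤ 'Z')
      | none => false) then false
  else if ¬ ((PySem.List.pyRange 5 9 1).all fun i =>
      match PySem.List.pyGet? cs i with
      | some c => decide ('0' ≤ c) && decide (c ≤ '9')
      | none => false) then false
  else match PySem.List.pyGet? cs (-1) with
    | some c => if decide ('A' ≤ c) && decide (c ≤ 'Z') then true else false
    | none => false

-- ===== PORT B =====
-- re.fullmatch of the fixed pattern [A-Z]{5}[0-9]{4}[A-Z] ported by hand: exact for this regex
def pvUp (c : Char) : Bool := decide ('A' ≤ c) && decide (c ≤ 'Z')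
def pvDig (c : Char) : Bool := decide ('0' ≤ c) && decide (c ≤ '9')
def check_pan_alt (name : String) : Bool :=
  match name.toList with
  | [a, b, c, d, e, f, g, h, i, j] =>
      pvUp a && pvUp b && pvUp c && pvUp d && pvUp e &&
      pvDig f && pvDig g && pvDig h && pvDig i && pvUp j
  | _ => false

-- ===== PRECONDITION & SPEC =====
def Spec_check_pan (name : String) (out : Bool) : Prop := out = check_pan_alt name
instance (name : String) (out : Bool) : Decidable (Spec_check_pan name out) := by unfold Spec_check_pan; infer_instance

-- ===== CLAIM (what is proved, stated in full; the proofs are below) =====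
def Claim_equal_check_pan : Prop := ∀ (name : String), Dom_check_pan name → Spec_check_pan name (check_pan name)

-- ===== LEMMAS AND PROOFS =====

-- ===== VERDICT (by name: the statement is the Claim_ definition above) =====
theorem check_pan_spec : Claim_equal_check_pan := by
  intro name _
  unfold Spec_check_pan check_pan check_pan_alt
  generalize name.toList = cs
  rcases cs with _|⟨a,_|⟨b,_|⟨c,_|⟨d,_|⟨e,_|⟨f,_|⟨g,_|⟨h8,_|⟨i,_|⟨j,_|⟨k,t⟩⟩⟩⟩⟩⟩⟩⟩⟩⟩⟩
  all_goals try rfl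
  · -- exactly ten characters: both sides reduce to the same conjunction of range tests
    have h1 : PySem.List.pyRange 0 5 1 = [0,1,2,3,4] := by decide
    have h2 : PySem.List.pyRange 5 9 1 = [5,6,7,8] := by decide
    simp only [h1, h2, List.all_cons, List.all_nil, pvUp, pvDig]
    norm_num [PySem.List.pyGet?, PySem.List.pyIdx?, not_lt]
    simp only [show Int.toNat 2 = 2 from rfl, show Int.toNat 3 = 3 from rfl,
      show Int.toNat 4 = 4 from rfl, show Int.toNat 5 = 5 from rfl,
      show Int.toNat 6 = 6 from rfl, show Int.toNat 7 = 7 from rfl,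
      show Int.toNat 8 = 8 from rfl, List.getElem_cons_succ, List.getElem_cons_zero]
    rw [Bool.eq_iff_iff]
    simp only [Bool.and_eq_true, Bool.not_eq_true', decide_eq_true_eq,
      decide_eq_false_iff_not, not_lt]
    tauto
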